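-- pv_equiv track=rewrite | github.com/yuta1331/watermark | anonymizer.py | address_grouper
-- ===== SOURCE A (Python) =====
-- def address_grouper(attr_list):
--     try:
--         first = attr_list.index('poscode')
--     except:
--         for i in range(len(attr_list)):
--             if 'addr' in attr_list[i]:
--                 first = i
--                 break
--     for i in range(len(attr_list))[::-1]:
--         if 'addr' in attr_list[i]:
--             last = i
--             return first, last
-- ===== SOURCE B (Python) =====
-- def address_grouper(attr_list):
--     addrs = [i for i, a in enumerate(attr_list) if 'addr' in a]
--     if not addrs:
--         return None
--     first = attr_list.index('poscode') if 'poscode' in attr_list else addrs[0]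
--     return first, addrs[-1]
-- ===== Notes on version B (the rewrite author's own statement) =====
-- stated objective: simpler
-- what changed: A does three separate scans (list.index in a try/except, a forward loop with break for the first 'addr', a reversed loop for the last 'addr'); B makes one enumerate pass collecting all 'addr' indices and reads the first/last of that list, with a plain membership test for 'poscode'.
-- outside the precondition, e.g. on address_grouper(['name', 'poscode']): A returns None, B returns None
import Mathlib
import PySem

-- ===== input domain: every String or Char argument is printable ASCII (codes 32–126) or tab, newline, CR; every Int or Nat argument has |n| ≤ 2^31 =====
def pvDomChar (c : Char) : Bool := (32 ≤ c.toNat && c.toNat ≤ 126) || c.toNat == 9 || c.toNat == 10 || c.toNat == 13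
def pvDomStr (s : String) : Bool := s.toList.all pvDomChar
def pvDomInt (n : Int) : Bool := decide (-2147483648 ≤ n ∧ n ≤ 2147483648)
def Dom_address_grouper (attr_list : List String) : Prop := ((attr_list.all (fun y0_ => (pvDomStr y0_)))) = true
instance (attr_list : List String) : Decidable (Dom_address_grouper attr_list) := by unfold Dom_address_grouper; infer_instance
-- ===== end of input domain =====

-- B replaces A's three separate scans (try/index, forward break loop, reversed loop) by one
-- enumerate-filter pass collecting all 'addr' indices; objective: simpler. Equivalence is about
-- the return value; neither version mutates its argument.

-- ===== PORT A =====
-- try: first = attr_list.index('poscode')  /  except: forward scan for the first 'addr';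
-- then the reversed index loop returning (first, i) at the last 'addr'.
def address_grouper (attr_list : List String) : Int × Int :=
  let first : Int :=
    match PySem.List.index? attr_list "poscode" with
    | some k => (k : Int)
    | none =>
      match attr_list.findIdx? (fun a => PySem.Str.isIn "addr" a) with
      | some i => (i : Int)
      | none => 0   -- 'first' stays unbound in Python; unreachable under Pre_ (no 'addr' element ⇒ Python returns None)
  match (PySem.List.enumerate attr_list).reverse.find? (fun p => PySem.Str.isIn "addr" p.2) with
  | some p => (first, p.1)
  | none => (0, 0)  -- Python falls off the loop and returns None; excluded by Pre_

-- ===== PORT B =====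
def address_grouper_alt (attr_list : List String) : Int × Int :=
  let addrs : List Int :=
    ((PySem.List.enumerate attr_list).filter (fun p => PySem.Str.isIn "addr" p.2)).map (·.1)
  match addrs with
  | [] => (0, 0)  -- Python returns None; excluded by Pre_
  | a0 :: rest =>
    ((if attr_list.contains "poscode"
        then (((PySem.List.index? attr_list "poscode").getD 0 : Nat) : Int)
        else a0),
     rest.getLastD a0)

-- ===== PRECONDITION & SPEC =====
-- Pre_ excludes exactly the inputs with no element containing 'addr', on which Python A
-- returns None (not an int pair) — falling off the final loop.
def Pre_address_grouper (attr_list : List String) : Prop :=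
  attr_list.any (fun a => PySem.Str.isIn "addr" a) = true
instance (attr_list : List String) : Decidable (Pre_address_grouper attr_list) := by
  unfold Pre_address_grouper; infer_instance

def pvWitness_address_grouper : List String := ["poscode", "home_addr", "name", "addr2"]

def Spec_address_grouper (attr_list : List String) (out : Int × Int) : Prop := out = address_grouper_alt attr_list
instance (attr_list : List String) (out : Int × Int) : Decidable (Spec_address_grouper attr_list out) := by unfold Spec_address_grouper; infer_instance

-- ===== CLAIM (what is proved, stated in full; the proofs are below) =====
def Claim_equal_address_grouper : Prop := ∀ (attr_list : List String), Dom_address_grouper attr_list → Pre_address_grouper attr_list → Spec_address_grouper attr_list (address_grouper attr_list)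

-- ===== LEMMAS AND PROOFS =====

-- find? is the head of the filtered list
theorem pv_find?_eq_head?_filter {α : Type} (l : List α) (p : α → Bool) :
    l.find? p = (l.filter p).head? := by
  induction l with
  | nil => rfl
  | cons x xs ih =>
    rw [List.find?_cons, List.filter_cons]
    cases h : p x
    · simp only [Bool.false_eq_true, if_false]; exact ih
    · rfl

-- a reversed search returns the last match
theorem pv_find?_reverse {α : Type} (l : List α) (p : α → Bool) :
    l.reverse.find? p = (l.filter p).getLast? := by
  rw [pv_find?_eq_head?_filter, List.filter_reverse, List.head?_reverse]

theorem pv_getLast?_cons {α : Type} (a : α) (l : List α) :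
    (a :: l).getLast? = some (l.getLastD a) := by
  induction l generalizing a with
  | nil => rfl
  | cons x xs ih => rw [List.getLast?_cons_cons, ih, List.getLastD_cons]

-- the head of the filtered enumeration is the first matching index
theorem pv_head?_filter_enumerate (q : String → Bool) (l : List String) (s : Int) :
    (((PySem.List.enumerate l s).filter (fun p => q p.2)).head?).map (·.1)
      = (l.findIdx? q).map (fun i => s + (i : Int)) := by
  induction l generalizing s with
  | nil => simp [PySem.List.enumerate_nil]
  | cons x xs ih =>
    rw [PySem.List.enumerate_cons, List.filter_cons]
    cases h : q x
    · simp only [h, Bool.false_eq_true, if_false, List.findIdx?_cons, ih]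
      cases hfi : xs.findIdx? q <;> simp [Int.add_comm, Int.add_left_comm]
    · simp [h, List.findIdx?_cons]

theorem address_grouper_eq (attr_list : List String)
    (hpre : Pre_address_grouper attr_list) :
    address_grouper attr_list = address_grouper_alt attr_list := by
  unfold Pre_address_grouper at hpre
  unfold address_grouper address_grouper_alt
  set q : String → Bool := fun a => PySem.Str.isIn "addr" a with hq
  set F := (PySem.List.enumerate attr_list).filter (fun p => q p.2) with hF
  -- F is nonempty
  have hFne : F ≠ [] := by
    rw [List.any_eq_true] at hpre
    obtain ⟨x, hx, hqx⟩ := hpre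
    have : x ∈ (PySem.List.enumerate attr_list).map (·.2) := by
      rw [PySem.List.map_snd_enumerate]; exact hx
    obtain ⟨p, hp, hps⟩ := List.mem_map.mp this
    intro h
    have : p ∈ F := List.mem_filter.mpr ⟨hp, by simp [hps, hqx]⟩
    simp [h] at this
  obtain ⟨a0, rest, haddrs⟩ : ∃ a0 rest, F.map (·.1) = a0 :: rest := by
    cases hFc : F with
    | nil => exact absurd hFc hFne
    | cons y ys => exact ⟨y.1, ys.map (·.1), rfl⟩
  -- the reverse search finds the last element of F
  obtain ⟨g, hg⟩ : ∃ g, F.getLast? = some g :=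
    Option.isSome_iff_exists.mp (by rw [List.getLast?_isSome]; exact hFne)
  have hrev : (PySem.List.enumerate attr_list).reverse.find? (fun p => q p.2) = some g := by
    rw [pv_find?_reverse, ← hF, hg]
  have hlast : rest.getLastD a0 = g.1 := by
    have h1 : (F.map (·.1)).getLast? = some (rest.getLastD a0) := by
      rw [haddrs, pv_getLast?_cons]
    have h2 : (F.map (·.1)).getLast? = some g.1 := by
      rw [List.getLast?_map, hg]; rfl
    rw [h1] at h2; exact Option.some_inj.mp h2
  rw [hrev, haddrs]
  simp only
  rw [hlast]
  -- the first components agree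
  congr 1
  cases hidx : PySem.List.index? attr_list "poscode" with
  | some k =>
    have hmem : "poscode" ∈ attr_list :=
      (PySem.List.index?_isSome_iff attr_list "poscode").mp (by rw [hidx]; rfl)
    rw [if_pos (List.contains_iff_mem.mpr hmem)]; rfl
  | none =>
    have hnmem : "poscode" ∉ attr_list :=
      (PySem.List.index?_eq_none_iff attr_list "poscode").mp hidx
    rw [if_neg (by simpa [List.contains_iff_mem] using hnmem)]
    have hhead : (F.map (·.1)).head? = some a0 := by rw [haddrs]; rfl
    have h1 : (F.head?).map (·.1) = some a0 := by
      rw [← List.head?_map]; exact hhead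
    have h2 := pv_head?_filter_enumerate q attr_list 0
    rw [← hF, h1] at h2
    cases hfi : attr_list.findIdx? q with
    | none => rw [hfi] at h2; exact absurd h2 (by simp)
    | some i =>
      rw [hfi] at h2
      simp at h2
      show (i : Int) = a0
      omega

-- ===== VERDICT (by name: the statement is the Claim_ definition above) =====
theorem address_grouper_spec : Claim_equal_address_grouper := by
  intro attr_list _ hpre
  unfold Spec_address_grouper
  exact address_grouper_eq attr_list hpre
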